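-- pv_equiv track=rewrite | github.com/NVIDIA-AI-IOT/deepstream_reference_apps | deepstream-tracker-3d-multi-view/utils/deepstream_auto_configurator.py | _update_sources
-- ===== SOURCE A (Python) =====
-- from typing import List, Tuple, Dict
--
-- def _update_sources(content: str, video_files: List[str]) -> str:
--     lines = content.split('\n')
--     result = []
--     i = 0
--     sources_added = 0
--
--     while i < len(lines):
--         line = lines[i]
--
--         if line.strip().startswith('[source') and sources_added < len(video_files):
--             # Keep/add source section
--             result.append(line)
--             i += 1
--             while i < len(lines) and not (lines[i].strip().startswith('[') and lines[i].strip().endswith(']')):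
--                 if lines[i].strip().startswith('uri='):
--                     result.append(f"uri=file:///workspace/inputs/videos/{video_files[sources_added]}")
--                 else:
--                     result.append(lines[i])
--                 i += 1
--             sources_added += 1
--             continue
--         elif line.strip().startswith('[source') and sources_added >= len(video_files):
--             # Skip extra source sections
--             i += 1
--             while i < len(lines) and not (lines[i].strip().startswith('[') and lines[i].strip().endswith(']')):
--                 i += 1
--             continue
--         elif line.strip().startswith('[streammux]'):
--             # Add missing sources before streammux
--             while sources_added < len(video_files):
--                 result.extend([
--                     "", f"[source{sources_added}]", "type=3", "enable=1",
--                     "cudadec-memtype=0", "gpu-id=0", "num-sources=1",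
--                     f"uri=file:///workspace/inputs/videos/{video_files[sources_added]}"
--                 ])
--                 sources_added += 1
--
--             # Add blank line before streammux section
--             result.append("")
--             result.append(line)
--         else:
--             result.append(line)
--         i += 1
--
--     return '\n'.join(result)
-- ===== SOURCE B (Python) =====
-- def _update_sources(content, video_files):
--     # Single-pass state machine over the lines: mode 0 = copy, 1 = inside a kept
--     # source section (rewriting uri= lines), 2 = inside a skipped source section.
--     out = []
--     added = 0
--     mode = 0
--     uri = ''
--     for line in content.split('\n'):
--         s = line.strip()
--         if s.startswith('[') and s.endswith(']'):
--             mode = 0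
--         if mode == 0:
--             if s.startswith('[source'):
--                 if added < len(video_files):
--                     out.append(line)
--                     uri = "uri=file:///workspace/inputs/videos/" + video_files[added]
--                     added += 1
--                     mode = 1
--                 else:
--                     mode = 2
--             elif s.startswith('[streammux]'):
--                 for k in range(added, len(video_files)):
--                     out.extend(["", "[source%d]" % k, "type=3", "enable=1",
--                                 "cudadec-memtype=0", "gpu-id=0", "num-sources=1",
--                                 "uri=file:///workspace/inputs/videos/" + video_files[k]])
--                 added = len(video_files)
--                 out.append("")
--                 out.append(line)
--             else:
--                 out.append(line)
--         elif mode == 1: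
--             out.append(uri if s.startswith('uri=') else line)
--         # mode 2: skip the line
--     return '\n'.join(out)
-- ===== Notes on version B (the rewrite author's own statement) =====
-- stated objective: alternative
-- what changed: Replaced the index-driven while loop with nested body-consuming inner loops and continue statements by a single for-loop state machine (copy / keep-source / skip-source modes) that processes each line exactly once.
import Mathlib
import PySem

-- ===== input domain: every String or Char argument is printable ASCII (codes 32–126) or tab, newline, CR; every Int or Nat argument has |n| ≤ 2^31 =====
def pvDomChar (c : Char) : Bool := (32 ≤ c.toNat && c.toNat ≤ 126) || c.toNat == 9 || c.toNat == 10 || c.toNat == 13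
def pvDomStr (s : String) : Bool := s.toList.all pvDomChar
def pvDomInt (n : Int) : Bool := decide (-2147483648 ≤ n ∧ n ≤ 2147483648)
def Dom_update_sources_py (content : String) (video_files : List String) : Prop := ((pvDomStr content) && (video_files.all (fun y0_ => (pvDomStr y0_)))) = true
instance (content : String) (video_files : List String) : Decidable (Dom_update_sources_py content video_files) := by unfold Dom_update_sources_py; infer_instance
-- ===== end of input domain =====

-- B replaces A's index-driven while loop (with nested inner loops and `continue`)
-- by a single-pass state machine over the lines; same cost, different decomposition.

-- shared line predicates (the same tests both Pythons write inline)
def pvBoundary (l : String) : Bool :=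
  PySem.Str.startswith (PySem.Str.strip l) "[" && PySem.Str.endswith (PySem.Str.strip l) "]"
def pvIsSrc (l : String) : Bool := PySem.Str.startswith (PySem.Str.strip l) "[source"
def pvIsMux (l : String) : Bool := PySem.Str.startswith (PySem.Str.strip l) "[streammux]"
def pvIsUri (l : String) : Bool := PySem.Str.startswith (PySem.Str.strip l) "uri="
def pvUriOf (v : String) : String := "uri=file:///workspace/inputs/videos/" ++ v

-- ===== PORT A =====
-- A's inner while after a kept '[source' header: (rewritten body lines, remaining lines)
def pvAKeep (uri : String) : List String → List String × List String
  | [] => ([], [])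
  | l :: ls =>
    if pvBoundary l then ([], l :: ls)
    else ((if pvIsUri l then uri else l) :: (pvAKeep uri ls).1, (pvAKeep uri ls).2)

-- A's inner while after a skipped '[source' header: the remaining lines
def pvASkip : List String → List String
  | [] => []
  | l :: ls => if pvBoundary l then l :: ls else pvASkip ls

-- A's 'while sources_added < len(video_files)' before [streammux]: (synthesized lines, new counter)
def pvASynth (vf : List String) (added : Nat) : List String × Nat :=
  if added < vf.length then
    (["", "[source" ++ PySem.Int.toStr (added : Int) ++ "]", "type=3", "enable=1",
      "cudadec-memtype=0", "gpu-id=0", "num-sources=1", pvUriOf (vf.getD added "")]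
      ++ (pvASynth vf (added + 1)).1, (pvASynth vf (added + 1)).2)
  else ([], added)
termination_by vf.length - added

theorem pvAKeep_snd_length (uri : String) (ls : List String) :
    (pvAKeep uri ls).2.length ≤ ls.length := by
  induction ls with
  | nil => simp [pvAKeep]
  | cons l ls ih =>
    simp only [pvAKeep]
    split
    · simp
    · simpa using Nat.le_succ_of_le ih

theorem pvASkip_length (ls : List String) : (pvASkip ls).length ≤ ls.length := by
  induction ls with
  | nil => simp [pvASkip]
  | cons l ls ih =>
    simp only [pvASkip]
    split
    · simp
    · exact Nat.le_succ_of_le ih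

-- A's outer while loop over the remaining lines
def pvAGo (vf : List String) : List String → Nat → List String
  | [], _ => []
  | l :: ls, added =>
    if pvIsSrc l && added < vf.length then
      l :: (pvAKeep (pvUriOf (vf.getD added "")) ls).1
        ++ pvAGo vf (pvAKeep (pvUriOf (vf.getD added "")) ls).2 (added + 1)
    else if pvIsSrc l then
      pvAGo vf (pvASkip ls) added
    else if pvIsMux l then
      (pvASynth vf added).1 ++ [""] ++ [l] ++ pvAGo vf ls (pvASynth vf added).2
    else
      l :: pvAGo vf ls added
termination_by ls => ls.length
decreasing_by
  · exact Nat.lt_succ_of_le (pvAKeep_snd_length _ ls)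
  · exact Nat.lt_succ_of_le (pvASkip_length ls)
  · exact Nat.lt_succ_self _
  · exact Nat.lt_succ_self _

def update_sources_py (content : String) (video_files : List String) : String :=
  PySem.Str.join "\n" (pvAGo video_files ((PySem.Str.split? content "\n").getD []) 0)

-- ===== PORT B =====
-- state: (out, sources_added, mode, current uri line); mode 0 copy, 1 keep-source, 2 skip-source
def pvBStep (vf : List String) (st : List String × Nat × Nat × String) (line : String) :
    List String × Nat × Nat × String :=
  let mode := if pvBoundary line then 0 else st.2.2.1
  if mode = 0 then
    if pvIsSrc line then
      if st.2.1 < vf.length then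
        (st.1 ++ [line], st.2.1 + 1, 1, pvUriOf (vf.getD st.2.1 ""))
      else (st.1, st.2.1, 2, st.2.2.2)
    else if pvIsMux line then
      (st.1 ++ (PySem.List.pyRange (st.2.1 : Int) (vf.length : Int) 1).flatMap
          (fun k => ["", "[source" ++ PySem.Int.toStr k ++ "]", "type=3", "enable=1",
                     "cudadec-memtype=0", "gpu-id=0", "num-sources=1",
                     pvUriOf (PySem.List.pyGetD vf k "")])
        ++ [""] ++ [line], vf.length, 0, st.2.2.2)
    else (st.1 ++ [line], st.2.1, 0, st.2.2.2)
  else if mode = 1 then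
    (st.1 ++ [if pvIsUri line then st.2.2.2 else line], st.2.1, 1, st.2.2.2)
  else (st.1, st.2.1, 2, st.2.2.2)

def update_sources_py_alt (content : String) (video_files : List String) : String :=
  PySem.Str.join "\n"
    (((PySem.Str.split? content "\n").getD []).foldl (pvBStep video_files) ([], 0, 0, "")).1

-- ===== PRECONDITION & SPEC =====
def Spec_update_sources_py (content : String) (video_files : List String) (out : String) : Prop := out = update_sources_py_alt content video_files
instance (content : String) (video_files : List String) (out : String) : Decidable (Spec_update_sources_py content video_files out) := by unfold Spec_update_sources_py; infer_instance

-- ===== CLAIM (what is proved, stated in full; the proofs are below) =====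
def Claim_equal_update_sources_py : Prop := ∀ (content : String) (video_files : List String), Dom_update_sources_py content video_files → Spec_update_sources_py content video_files (update_sources_py content video_files)

-- ===== LEMMAS AND PROOFS =====

theorem pvBStep_boundary (vf : List String) (out : List String) (a m : Nat) (u l : String)
    (h : pvBoundary l = true) :
    pvBStep vf (out, a, m, u) l = pvBStep vf (out, a, 0, u) l := by
  simp [pvBStep, h]

theorem pvBStep_body1 (vf : List String) (out : List String) (a : Nat) (u l : String)
    (h : pvBoundary l = false) :
    pvBStep vf (out, a, 1, u) l = (out ++ [if pvIsUri l then u else l], a, 1, u) := by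
  simp [pvBStep, h]

theorem pvBStep_body2 (vf : List String) (out : List String) (a : Nat) (u l : String)
    (h : pvBoundary l = false) :
    pvBStep vf (out, a, 2, u) l = (out, a, 2, u) := by
  simp [pvBStep, h]

theorem pvKeep_fold (vf : List String) (ls : List String) (out : List String) (a : Nat)
    (u : String) :
    (List.foldl (pvBStep vf) (out, a, 1, u) ls).1
      = (List.foldl (pvBStep vf) (out ++ (pvAKeep u ls).1, a, 0, u) (pvAKeep u ls).2).1 := by
  induction ls generalizing out with
  | nil => simp [pvAKeep]
  | cons l ls ih =>
    by_cases hb : pvBoundary l = true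
    · simp only [pvAKeep, hb, if_pos, List.foldl_cons, List.append_nil,
        pvBStep_boundary vf out a 1 u l hb]
    · have hb' : pvBoundary l = false := by simpa using hb
      simp only [pvAKeep, hb', Bool.false_eq_true, if_false, List.foldl_cons,
        pvBStep_body1 vf out a u l hb']
      rw [ih]
      simp [List.append_assoc]

theorem pvSkip_fold (vf : List String) (ls : List String) (out : List String) (a : Nat)
    (u : String) :
    (List.foldl (pvBStep vf) (out, a, 2, u) ls).1
      = (List.foldl (pvBStep vf) (out, a, 0, u) (pvASkip ls)).1 := by
  induction ls with
  | nil => simp [pvASkip]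
  | cons l ls ih =>
    by_cases hb : pvBoundary l = true
    · simp only [pvASkip, hb, if_pos, List.foldl_cons, pvBStep_boundary vf out a 2 u l hb]
    · have hb' : pvBoundary l = false := by simpa using hb
      simp only [pvASkip, hb', Bool.false_eq_true, if_false, List.foldl_cons,
        pvBStep_body2 vf out a u l hb', ih]

theorem pvSynth_eq (vf : List String) (added : Nat) (h : added ≤ vf.length) :
    pvASynth vf added
      = ((PySem.List.pyRange (added : Int) (vf.length : Int) 1).flatMap
          (fun k => ["", "[source" ++ PySem.Int.toStr k ++ "]", "type=3", "enable=1",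
                     "cudadec-memtype=0", "gpu-id=0", "num-sources=1",
                     pvUriOf (PySem.List.pyGetD vf k "")]),
         vf.length) := by
  by_cases hlt : added < vf.length
  · rw [pvASynth, if_pos hlt,
      PySem.List.pyRange_one_cons (show (added : Int) < (vf.length : Int) by exact_mod_cast hlt),
      pvSynth_eq vf (added + 1) hlt]
    have hg : PySem.List.pyGetD vf (added : Int) "" = vf.getD added "" :=
      PySem.List.pyGetD_natCast vf added ""
    simp [hg]
  · have he : added = vf.length := Nat.le_antisymm h (Nat.le_of_not_lt hlt)
    subst he
    rw [pvASynth, if_neg hlt]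
    simp [PySem.List.pyRange]
termination_by vf.length - added

theorem pvMain (vf : List String) (lines : List String) (added : Nat) (out : List String)
    (u : String) (h : added ≤ vf.length) :
    (List.foldl (pvBStep vf) (out, added, 0, u) lines).1 = out ++ pvAGo vf lines added := by
  match lines with
  | [] => simp [pvAGo]
  | l :: ls =>
    by_cases hsrc : pvIsSrc l = true
    · have hstep : pvBStep vf (out, added, 0, u) l
          = if added < vf.length then
              (out ++ [l], added + 1, 1, pvUriOf (vf.getD added ""))
            else (out, added, 2, u) := by
        simp [pvBStep, hsrc]
      by_cases hn : added < vf.length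
      · have hlen : (pvAKeep (pvUriOf (vf.getD added "")) ls).2.length ≤ ls.length :=
          pvAKeep_snd_length _ ls
        simp only [List.foldl_cons, hstep, if_pos hn]
        rw [pvKeep_fold, pvMain vf _ (added + 1) _ _ hn]
        simp [pvAGo, hsrc, hn, List.append_assoc]
      · have hlen : (pvASkip ls).length ≤ ls.length := pvASkip_length ls
        simp only [List.foldl_cons, hstep, if_neg hn]
        rw [pvSkip_fold, pvMain vf _ added _ _ h]
        simp [pvAGo, hsrc, hn]
    · have hsrc' : pvIsSrc l = false := by simpa using hsrc
      by_cases hmux : pvIsMux l = true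
      · have hstep : pvBStep vf (out, added, 0, u) l
            = (out ++ (PySem.List.pyRange (added : Int) (vf.length : Int) 1).flatMap
                  (fun k => ["", "[source" ++ PySem.Int.toStr k ++ "]", "type=3", "enable=1",
                             "cudadec-memtype=0", "gpu-id=0", "num-sources=1",
                             pvUriOf (PySem.List.pyGetD vf k "")])
                ++ [""] ++ [l], vf.length, 0, u) := by
          simp [pvBStep, hsrc', hmux]
        simp only [List.foldl_cons, hstep]
        rw [pvMain vf ls vf.length _ _ (le_refl _)]
        simp [pvAGo, hsrc', hmux, pvSynth_eq vf added h, List.append_assoc]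
      · have hmux' : pvIsMux l = false := by simpa using hmux
        have hstep : pvBStep vf (out, added, 0, u) l = (out ++ [l], added, 0, u) := by
          simp [pvBStep, hsrc', hmux']
        simp only [List.foldl_cons, hstep]
        rw [pvMain vf ls added _ _ h]
        simp [pvAGo, hsrc', hmux']
termination_by lines.length
decreasing_by
  · exact Nat.lt_succ_of_le hlen
  · exact Nat.lt_succ_of_le hlen
  · exact Nat.lt_succ_self _
  · exact Nat.lt_succ_self _

-- ===== VERDICT (by name: the statement is the Claim_ definition above) =====
theorem update_sources_py_spec : Claim_equal_update_sources_py := by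
  intro content video_files _
  unfold Spec_update_sources_py update_sources_py update_sources_py_alt
  rw [pvMain video_files _ 0 [] "" (Nat.zero_le _)]
  simp
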